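-- pv_equiv track=rewrite | github.com/EvanNingduoZhao/LeetCode | code_signal_problems/coolFeature.py | coolFeature
-- ===== SOURCE A (Python) =====
-- def coolFeature(a,b,queries):
--     aContent=set(a)
--     res=[]
--     for query in queries:
--         if len(query)==2:
--             count=0
--             for num in b:
--                 if query[1]-num in aContent:
--                     count+=1
--             res.append(count)
--         else:
--             b[query[0]]=query[1]
--     return res
-- ===== SOURCE B (Python) =====
-- def coolFeature(a, b, queries):
--     aSet = set(a)
--     cnt = {}
--     for x in b:
--         cnt[x] = cnt.get(x, 0) + 1
--     res = []
--     for q in queries: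
--         if len(q) == 2:
--             t = q[1]
--             res.append(sum(cnt.get(t - x, 0) for x in aSet))
--         else:
--             old = b[q[0]]
--             cnt[old] -= 1
--             b[q[0]] = q[1]
--             cnt[q[1]] = cnt.get(q[1], 0) + 1
--     return res
-- ===== Notes on version B (the rewrite author's own statement) =====
-- stated objective: alternative
-- what changed: B builds a hash-map counter of b once and answers each count query by summing counter[target-x] over the distinct elements of set(a) (updating the counter and b in place on update queries), instead of rescanning all of b for every query.
import Mathlib
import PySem

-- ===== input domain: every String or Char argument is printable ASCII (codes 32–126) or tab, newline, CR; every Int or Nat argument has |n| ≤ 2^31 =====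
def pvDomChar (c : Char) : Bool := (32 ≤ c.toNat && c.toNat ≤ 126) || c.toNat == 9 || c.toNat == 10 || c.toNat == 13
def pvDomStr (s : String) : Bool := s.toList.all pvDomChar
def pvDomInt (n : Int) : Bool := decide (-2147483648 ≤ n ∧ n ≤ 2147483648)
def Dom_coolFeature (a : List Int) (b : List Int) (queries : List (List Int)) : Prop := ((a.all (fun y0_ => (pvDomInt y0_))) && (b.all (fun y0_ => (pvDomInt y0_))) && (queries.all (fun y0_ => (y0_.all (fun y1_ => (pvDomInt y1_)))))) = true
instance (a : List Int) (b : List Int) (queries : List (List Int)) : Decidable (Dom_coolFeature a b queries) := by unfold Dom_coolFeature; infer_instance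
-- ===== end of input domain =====

-- B replaces A's per-query scan of b by a counter of b kept up to date across updates,
-- summing counter[target-x] over the distinct elements of set(a) for each count query.
-- Both A and B mutate the argument list b in place on update queries (same mutation);
-- the equivalence proved here is about the returned list of counts.

-- ===== PORT A =====
def coolFeature (a : List Int) (b : List Int) (queries : List (List Int)) : List Int :=
  let aContent := PySem.Set.ofList a
  let st := queries.foldl (fun (st : List Int × List Int) query =>
    if query.length == 2 then
      let count := st.1.foldl (fun count num =>
        if PySem.Set.contains aContent (PySem.List.pyGetD query 1 0 - num) then count + 1 else count) (0 : Int)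
      (st.1, st.2 ++ [count])
    else
      (PySem.List.pySetD st.1 (PySem.List.pyGetD query 0 0) (PySem.List.pyGetD query 1 0), st.2))
    (b, ([] : List Int))
  st.2

-- ===== PORT B =====
-- cnt[old] -= 1 is ported as insert old (getD old 0 - 1): under Pre_ the key old = b[i] is
-- always present in cnt (every current element of b has been counted), so getD is exact there.
def coolFeature_alt (a : List Int) (b : List Int) (queries : List (List Int)) : List Int :=
  let aSet := PySem.Set.ofList a
  let cnt0 := b.foldl (fun d x => PySem.Dict.insert d x (PySem.Dict.getD d x 0 + 1)) PySem.Dict.empty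
  let st := queries.foldl (fun (st : List Int × PySem.Dict Int Int × List Int) q =>
    if q.length == 2 then
      let t := PySem.List.pyGetD q 1 0
      (st.1, st.2.1, st.2.2 ++ [(aSet.map (fun x => PySem.Dict.getD st.2.1 (t - x) 0)).sum])
    else
      let old := PySem.List.pyGetD st.1 (PySem.List.pyGetD q 0 0) 0
      let c1 := PySem.Dict.insert st.2.1 old (PySem.Dict.getD st.2.1 old 0 - 1)
      let b' := PySem.List.pySetD st.1 (PySem.List.pyGetD q 0 0) (PySem.List.pyGetD q 1 0)
      let c2 := PySem.Dict.insert c1 (PySem.List.pyGetD q 1 0) (PySem.Dict.getD c1 (PySem.List.pyGetD q 1 0) 0 + 1)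
      (b', c2, st.2.2))
    (b, cnt0, ([] : List Int))
  st.2.2

-- ===== PRECONDITION & SPEC =====
-- A raises IndexError on a query of length < 2 (query[1]) and on an update query whose
-- index query[0] is out of range for b; Pre_ excludes exactly those inputs.
def Pre_coolFeature (a : List Int) (b : List Int) (queries : List (List Int)) : Prop :=
  ∀ q ∈ queries, 2 ≤ q.length ∧ (q.length ≠ 2 → PySem.Raise.InRange b.length (PySem.List.pyGetD q 0 0))
instance (a : List Int) (b : List Int) (queries : List (List Int)) : Decidable (Pre_coolFeature a b queries) := by unfold Pre_coolFeature; infer_instance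
def pvWitness_coolFeature : List Int × List Int × List (List Int) := ([1, 2], [3, 1], [[0, 5], [0, 4, 0], [-1, 2, 0], [0, 5]])

def Spec_coolFeature (a : List Int) (b : List Int) (queries : List (List Int)) (out : List Int) : Prop := out = coolFeature_alt a b queries
instance (a : List Int) (b : List Int) (queries : List (List Int)) (out : List Int) : Decidable (Spec_coolFeature a b queries out) := by unfold Spec_coolFeature; infer_instance

-- ===== CLAIM (what is proved, stated in full; the proofs are below) =====
def Claim_equal_coolFeature : Prop := ∀ (a : List Int) (b : List Int) (queries : List (List Int)), Dom_coolFeature a b queries → Pre_coolFeature a b queries → Spec_coolFeature a b queries (coolFeature a b queries)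

-- ===== LEMMAS AND PROOFS =====

-- sum of a 0/1 indicator over a duplicate-free list
theorem pv_sum_indicator (s : List Int) (hs : s.Nodup) (y : Int) :
    (s.map (fun x => if y = x then (1 : Int) else 0)).sum = if y ∈ s then 1 else 0 := by
  induction s with
  | nil => simp
  | cons z s ih =>
    rcases List.nodup_cons.mp hs with ⟨hz, hs'⟩
    by_cases h : y = z
    · subst h
      simp [ih hs', hz]
    · simp [h, ih hs', List.mem_cons]

-- A's inner scan of b equals the sum over the distinct a-elements of b's counts
theorem pv_count_scan (s : List Int) (hs : s.Nodup) (t : Int) (b : List Int) (c0 : Int) :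
    b.foldl (fun c num => if PySem.Set.contains s (t - num) then c + 1 else c) c0
      = c0 + (s.map (fun x => ((b.count (t - x) : Nat) : Int))).sum := by
  induction b generalizing c0 with
  | nil => simp
  | cons num b ih =>
    rw [List.foldl_cons, ih]
    have hsplit : (s.map (fun x => (((num :: b).count (t - x) : Nat) : Int))).sum
        = (s.map (fun x => ((b.count (t - x) : Nat) : Int))).sum
          + (s.map (fun x => if (t - num) = x then (1 : Int) else 0)).sum := by
      rw [← PySem.List.sum_map_add_int]
      apply congrArg
      apply List.map_congr_left
      intro x hx
      by_cases hxe : (t - num) = x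
      · have he : t - x = num := by omega
        simp [he, hxe]
      · have he2 : ¬ num = t - x := by omega
        simp [he2, hxe]
    rw [hsplit, pv_sum_indicator s hs (t - num)]
    have hco : PySem.Set.contains s (t - num) = true ↔ (t - num) ∈ s := PySem.Set.contains_iff s (t - num)
    by_cases hmem : (t - num) ∈ s
    · rw [if_pos (hco.mpr hmem), if_pos hmem]; ring
    · rw [if_neg (fun hb => hmem (hco.mp hb)), if_neg hmem]; ring

-- counting lists: count after a set
theorem pv_count_set (xs : List Int) (n : Nat) (h : n < xs.length) (v w : Int) :
    (((xs.set n v).count w : Nat) : Int)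
      = (xs.count w : Nat) - (if xs[n] = w then 1 else 0) + (if v = w then 1 else 0) := by
  induction xs generalizing n with
  | nil => simp at h
  | cons x xs ih =>
    cases n with
    | zero => simp [List.count_cons]; split_ifs <;> simp_all
    | succ m =>
      have hm : m < xs.length := by simpa using h
      simp [List.count_cons, ih m hm]
      split_ifs <;> omega

-- resolved nonnegative index of a possibly negative in-range Python index
theorem pv_pyIdx (n : Nat) (i : Int) (h : PySem.Raise.InRange n i) :
    PySem.List.pyIdx? n i = some ((if i < 0 then (n : Int) + i else i).toNat) := by
  obtain ⟨h1, h2⟩ := h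
  by_cases h0 : 0 ≤ i
  · rw [if_neg (by omega)]
    simp only [PySem.List.pyIdx?, if_pos h0, if_pos h2]
  · rw [if_pos (by omega)]
    simp only [PySem.List.pyIdx?, if_neg h0, if_pos h1]
    congr 1
    omega

theorem pv_idx_lt (n : Nat) (i : Int) (h : PySem.Raise.InRange n i) :
    (if i < 0 then (n : Int) + i else i).toNat < n := by
  obtain ⟨h1, h2⟩ := h
  split_ifs <;> omega

theorem pv_pyGetD_inrange (xs : List Int) (i : Int) (h : PySem.Raise.InRange xs.length i) (d : Int) :
    PySem.List.pyGetD xs i d = xs[(if i < 0 then (xs.length : Int) + i else i).toNat]'(pv_idx_lt xs.length i h) := by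
  simp only [PySem.List.pyGetD, PySem.List.pyGet?, pv_pyIdx xs.length i h, Option.bind_some]
  rw [List.getElem?_eq_getElem (pv_idx_lt xs.length i h)]
  rfl

theorem pv_pySetD_inrange (xs : List Int) (i : Int) (h : PySem.Raise.InRange xs.length i) (v : Int) :
    PySem.List.pySetD xs i v = xs.set (if i < 0 then (xs.length : Int) + i else i).toNat v := by
  simp only [PySem.List.pySetD, PySem.List.pySet?, pv_pyIdx xs.length i h, Option.map_some, Option.getD_some]

-- the initial counter counts b
theorem pv_cnt0 (b : List Int) (w : Int) :
    (b.foldl (fun d x => PySem.Dict.insert d x (PySem.Dict.getD d x 0 + 1)) PySem.Dict.empty).getD w 0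
      = ((b.count w : Nat) : Int) := by
  rw [PySem.Dict.foldl_insert_getD_add_one_eq_counter, PySem.Dict.getD_counter]

-- the counter stays correct across an update (stated over the resolved Nat index)
theorem pv_cnt_upd (bcur : List Int) (cnt : PySem.Dict Int Int) (n : Nat) (hn : n < bcur.length)
    (old v : Int) (hold : old = bcur[n])
    (hc : ∀ w, cnt.getD w 0 = ((bcur.count w : Nat) : Int)) (w : Int) :
    (PySem.Dict.insert
      (PySem.Dict.insert cnt old (PySem.Dict.getD cnt old 0 - 1))
      v (PySem.Dict.getD (PySem.Dict.insert cnt old (PySem.Dict.getD cnt old 0 - 1)) v 0 + 1)).getD w 0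
      = (((bcur.set n v).count w : Nat) : Int) := by
  subst hold
  rw [pv_count_set bcur n hn v w]
  simp only [PySem.Dict.getD_insert, hc]
  split_ifs <;> subst_vars <;> omega

-- the counter stays correct across an update query
theorem pv_cnt_update (bcur : List Int) (cnt : PySem.Dict Int Int) (i v : Int)
    (h : PySem.Raise.InRange bcur.length i)
    (hc : ∀ w, cnt.getD w 0 = ((bcur.count w : Nat) : Int)) (w : Int) :
    (PySem.Dict.insert
      (PySem.Dict.insert cnt (PySem.List.pyGetD bcur i 0)
        (PySem.Dict.getD cnt (PySem.List.pyGetD bcur i 0) 0 - 1))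
      v (PySem.Dict.getD (PySem.Dict.insert cnt (PySem.List.pyGetD bcur i 0)
        (PySem.Dict.getD cnt (PySem.List.pyGetD bcur i 0) 0 - 1)) v 0 + 1)).getD w 0
      = (((PySem.List.pySetD bcur i v).count w : Nat) : Int) := by
  rw [pv_pyGetD_inrange bcur i h 0, pv_pySetD_inrange bcur i h v]
  exact pv_cnt_upd bcur cnt _ (pv_idx_lt bcur.length i h) _ v rfl hc w

-- main loop invariant
theorem pv_loop (aContent : List Int) (hnd : aContent.Nodup)
    (queries : List (List Int)) (bcur : List Int) (cnt : PySem.Dict Int Int) (resA resB : List Int)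
    (hc : ∀ w, cnt.getD w 0 = ((bcur.count w : Nat) : Int))
    (hres : resA = resB)
    (hq : ∀ q ∈ queries, 2 ≤ q.length ∧ (q.length ≠ 2 → PySem.Raise.InRange bcur.length (PySem.List.pyGetD q 0 0))) :
    (queries.foldl (fun (st : List Int × List Int) query =>
      if query.length == 2 then
        let count := st.1.foldl (fun count num =>
          if PySem.Set.contains aContent (PySem.List.pyGetD query 1 0 - num) then count + 1 else count) (0 : Int)
        (st.1, st.2 ++ [count])
      else
        (PySem.List.pySetD st.1 (PySem.List.pyGetD query 0 0) (PySem.List.pyGetD query 1 0), st.2))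
      (bcur, resA)).2
    = (queries.foldl (fun (st : List Int × PySem.Dict Int Int × List Int) q =>
      if q.length == 2 then
        let t := PySem.List.pyGetD q 1 0
        (st.1, st.2.1, st.2.2 ++ [(aContent.map (fun x => PySem.Dict.getD st.2.1 (t - x) 0)).sum])
      else
        let old := PySem.List.pyGetD st.1 (PySem.List.pyGetD q 0 0) 0
        let c1 := PySem.Dict.insert st.2.1 old (PySem.Dict.getD st.2.1 old 0 - 1)
        let b' := PySem.List.pySetD st.1 (PySem.List.pyGetD q 0 0) (PySem.List.pyGetD q 1 0)
        let c2 := PySem.Dict.insert c1 (PySem.List.pyGetD q 1 0) (PySem.Dict.getD c1 (PySem.List.pyGetD q 1 0) 0 + 1)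
        (b', c2, st.2.2))
      (bcur, cnt, resB)).2.2 := by
  induction queries generalizing bcur cnt resA resB with
  | nil => simpa using hres
  | cons q qs ih =>
    obtain ⟨hlen, hidx⟩ := hq q (List.mem_cons_self)
    have hq' := fun p hp => hq p (List.mem_cons_of_mem q hp)
    rw [List.foldl_cons, List.foldl_cons]
    by_cases h2 : q.length = 2
    · simp only [h2, beq_self_eq_true, if_pos]
      apply ih bcur cnt _ _ hc _ hq'
      rw [hres]
      congr 1
      rw [pv_count_scan aContent hnd (PySem.List.pyGetD q 1 0) bcur 0]
      rw [zero_add]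
      congr 1
      congr 1
      apply List.map_congr_left
      intro x hx
      rw [hc]
    · have hb2 : (q.length == 2) = false := by simp [h2]
      simp only [hb2]
      have hin := hidx h2
      apply ih
      · intro w
        exact pv_cnt_update bcur cnt (PySem.List.pyGetD q 0 0) (PySem.List.pyGetD q 1 0) hin hc w
      · exact hres
      · intro p hp
        refine ⟨(hq' p hp).1, fun hne => ?_⟩
        have := (hq' p hp).2 hne
        rwa [PySem.List.length_pySetD]

-- ===== VERDICT (by name: the statement is the Claim_ definition above) =====
theorem coolFeature_spec : Claim_equal_coolFeature := by
  intro a b queries _ hpre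
  unfold Spec_coolFeature coolFeature coolFeature_alt
  exact pv_loop (PySem.Set.ofList a) (PySem.Set.nodup_ofList a) queries b _ [] [] (pv_cnt0 b) rfl hpre
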